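-- pv_equiv track=rewrite | github.com/ine16/Python_UNSAM | Clase04/propaga.py | propagar
-- ===== SOURCE A (Python) =====
-- def se_propaga(lista, pos_uno):
-- 	'''
-- 	Propaga a izquierda y derecha de la posición donde hay un 1 (pos_uno) hasta toparse con un -1 o hallarse en la
-- 	posición inicial o final de la lista. Devuelve la posición más a la derecha que contiene un -1 si lo hay,
-- 	caso contrario devuelve la última posición de la lista
-- 	'''
--
-- 	# 3 casos posibles: el 1 está en el extremo izquierdo de la lista, en el derecho o está en algún lugar en el medio
-- 	# Según cuál sea entrará a uno de los while o a ambos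
--
-- 	# Empiezo a evaluar en la posición anterior a donde tenía el 1
-- 	pos_anterior = pos_uno - 1
--
-- 	while pos_anterior >= 0 and lista[pos_anterior] != -1:
-- 		# Modifico el valor directamente para no añadir un if de más, ya que si valía 0 pasa a valer 1 y si valía 1 queda en 1
-- 		lista[pos_anterior] = 1
-- 		pos_anterior -= 1
--
--
-- 	# Empiezo a evaluar en la posición siguiente a donde tenía el 1
-- 	pos_siguiente = pos_uno + 1
-- 	pos_final = len(lista) - 1 # indice del último elemento de la lista ingresada
--
-- 	while pos_siguiente <= pos_final and lista[pos_siguiente] != -1: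
-- 		lista[pos_siguiente] = 1
-- 		pos_siguiente += 1
--
-- 	return pos_siguiente
--
-- def propagar(L):
-- 	'''
-- 	Recibe una lista L con 0's, 1's y -1's y devuelve una lista en la que los 1's se propagaron a sus vecinos con 0.
-- 	'''
--
-- 	# Inicio la búsqueda de 1's en el primer elemento (lo llamo "fósforo actual")
-- 	fosforo_actual = 0
--
-- 	# Ahora empieza a buscar 1's en la lista hasta terminarla
-- 	fosforo_final = len(L) - 1
-- 	while fosforo_actual <= fosforo_final:
--
-- 		# Cuando encuentra un 1 (fósforo encendido) se propaga a ambos lados hasta encontrar un -1 (fósforo apagado)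
-- 		if L[fosforo_actual] == 1:
--
-- 			# Luego de entrar en "se propaga", el fósforo actual pasa a ser el último índice donde hay un -1.
-- 			# Si no encuentra un -1 es el último índice de la lista
-- 			fosforo_actual = se_propaga(L, fosforo_actual)
--
-- 		fosforo_actual += 1
--
-- 	return L
-- ===== SOURCE B (Python) =====
-- def propagar(L):
--     '''
--     Recibe una lista L con 0's, 1's y -1's y devuelve una lista en la que los 1's se propagaron a sus vecinos con 0.
--     Single pass: split into maximal -1-free segments; a segment containing a 1 is overwritten with 1's.
--     Mutates L in place (full-slice assignment) and returns it, like A.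
--     '''
--     res = []
--     seg = []
--     for x in L:
--         if x == -1:
--             res.extend([1] * len(seg) if 1 in seg else seg)
--             res.append(-1)
--             seg = []
--         else:
--             seg.append(x)
--     res.extend([1] * len(seg) if 1 in seg else seg)
--     L[:] = res
--     return L
-- ===== Notes on version B (the rewrite author's own statement) =====
-- stated objective: simpler
-- what changed: A scans with a cursor that, at each 1, re-walks left and right mutating cells and jumps the cursor past the next -1; B makes one segment-splitting pass, buffering each maximal -1-free run and flushing it as all-1's iff it contains a 1.
import Mathlib
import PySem

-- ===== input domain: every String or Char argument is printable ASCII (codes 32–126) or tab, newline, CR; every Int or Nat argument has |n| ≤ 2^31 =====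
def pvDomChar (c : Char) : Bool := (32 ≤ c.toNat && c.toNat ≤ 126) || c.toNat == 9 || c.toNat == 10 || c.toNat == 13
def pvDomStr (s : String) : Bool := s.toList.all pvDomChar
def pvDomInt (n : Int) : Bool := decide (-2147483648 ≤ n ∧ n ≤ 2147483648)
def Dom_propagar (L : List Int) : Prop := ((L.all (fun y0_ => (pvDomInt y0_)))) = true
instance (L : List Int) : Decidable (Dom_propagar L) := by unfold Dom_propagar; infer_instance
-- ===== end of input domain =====

-- B replaces A's index-jumping scan by a single segment-splitting pass (simpler); both mutate
-- the caller's list in Python — the theorems below are about the returned value.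

-- ===== PORT A =====
-- Exact here: every call site has 0 ≤ i < l.length (guarded by the loops), so getD/set at i.toNat
-- computes exactly Python's lista[i] / lista[i] = v.
def pyidx (l : List Int) (i : Int) : Int := l.getD i.toNat 0
def pyset (l : List Int) (i : Int) (v : Int) : List Int := l.set i.toNat v

-- first while of se_propaga
def sePropLeft (l : List Int) (p : Int) : List Int :=
  if h : 0 ≤ p ∧ pyidx l p ≠ -1 then sePropLeft (pyset l p 1) (p - 1) else l
termination_by (p + 1).toNat
decreasing_by
  rw [Int.sub_add_cancel]
  exact (Int.toNat_lt_toNat (Int.lt_add_one_of_le h.1)).mpr (Int.lt_add_one_of_le le_rfl)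

-- second while of se_propaga; returns (list, pos_siguiente)
def sePropRight (l : List Int) (p : Int) (final : Int) : List Int × Int :=
  if h : p ≤ final ∧ pyidx l p ≠ -1 then sePropRight (pyset l p 1) (p + 1) final else (l, p)
termination_by (final + 1 - p).toNat
decreasing_by
  exact (Int.toNat_lt_toNat (Int.sub_pos.mpr (Int.lt_add_one_of_le h.1))).mpr
    (sub_lt_sub_left (Int.lt_add_one_of_le le_rfl) _)

def sePropaga (l : List Int) (posUno : Int) : List Int × Int :=
  let l1 := sePropLeft l (posUno - 1)
  sePropRight l1 (posUno + 1) ((l1.length : Int) - 1)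

-- needed by propLoop's termination proof
theorem sePropRight_snd_ge (l : List Int) (p final : Int) : p ≤ (sePropRight l p final).2 := by
  fun_induction sePropRight l p final with
  | case1 => omega
  | case2 => simp

theorem sePropaga_snd_ge (l : List Int) (i : Int) : i + 1 ≤ (sePropaga l i).2 := by
  unfold sePropaga
  exact sePropRight_snd_ge _ _ _

-- the while of propagar (fosforo_final computed once, lengths never change)
def propLoop (l : List Int) (i final : Int) : List Int :=
  if h : i ≤ final then
    if pyidx l i = 1 then
      let r := sePropaga l i
      propLoop r.1 (r.2 + 1) final
    else propLoop l (i + 1) final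
  else l
termination_by (final + 1 - i).toNat
decreasing_by
  · exact (Int.toNat_lt_toNat (Int.sub_pos.mpr (Int.lt_add_one_of_le h))).mpr
      (sub_lt_sub_left (Int.lt_add_one_of_le
        (le_trans (Int.le_add_one le_rfl) (sePropaga_snd_ge l i))) _)
  · exact (Int.toNat_lt_toNat (Int.sub_pos.mpr (Int.lt_add_one_of_le h))).mpr
      (sub_lt_sub_left (Int.lt_add_one_of_le le_rfl) _)

def propagar (L : List Int) : List Int := propLoop L 0 ((L.length : Int) - 1)

-- ===== PORT B =====
def flushSeg (seg : List Int) : List Int :=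
  if seg.contains 1 then seg.map (fun _ => 1) else seg

def goB (xs res seg : List Int) : List Int :=
  match xs with
  | [] => res ++ flushSeg seg
  | x :: t => if x = -1 then goB t (res ++ flushSeg seg ++ [-1]) [] else goB t res (seg ++ [x])

def propagar_alt (L : List Int) : List Int := goB L [] []

-- ===== PRECONDITION & SPEC =====
def Spec_propagar (L : List Int) (out : List Int) : Prop := out = propagar_alt L
instance (L : List Int) (out : List Int) : Decidable (Spec_propagar L out) := by unfold Spec_propagar; infer_instance

-- ===== CLAIM (what is proved, stated in full; the proofs are below) =====
def Claim_equal_propagar : Prop := ∀ (L : List Int), Dom_propagar L → Spec_propagar L (propagar L)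

-- ===== LEMMAS AND PROOFS =====

def ones (l : List Int) : List Int := l.map (fun _ => 1)

-- common functional model: bmodel b c = result of processing the remaining input c, where b is
-- the already-scanned (-1)- and 1-free part of the current segment; bafter t = rest of the
-- current segment once a 1 was found (filled with 1's up to the next -1).
mutual
def bmodel (b : List Int) : List Int → List Int
  | [] => b
  | x :: t =>
    if x = 1 then ones b ++ 1 :: bafter t
    else if x = -1 then b ++ -1 :: bmodel [] t
    else bmodel (b ++ [x]) t
def bafter : List Int → List Int
  | [] => []
  | y :: t => if y = -1 then -1 :: bmodel [] t else 1 :: bafter t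
end

theorem ones_append (a b : List Int) : ones (a ++ b) = ones a ++ ones b := by
  simp [ones]

theorem ones_length (a : List Int) : (ones a).length = a.length := by simp [ones]

theorem pyidx_mid (a : List Int) (x : Int) (d : List Int) :
    pyidx (a ++ x :: d) (a.length : Int) = x := by
  have : ((a.length : Int)).toNat = a.length := by omega
  simp [pyidx, this, List.getD, List.getElem?_append_right]

theorem pyset_mid (a : List Int) (x v : Int) (d : List Int) :
    pyset (a ++ x :: d) (a.length : Int) v = a ++ v :: d := by
  have h : ((a.length : Int)).toNat = a.length := by omega
  simp [pyset, h, List.set_append]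

-- left while: sweeps b (no -1, guarded below by a's trailing -1 or the list start) to 1's
theorem sePropLeft_spec (b : List Int) (hb : (-1 : Int) ∉ b) :
    ∀ a d, (a = [] ∨ a.getLast? = some (-1)) →
    sePropLeft (a ++ b ++ d) ((a.length : Int) + b.length - 1) = a ++ ones b ++ d := by
  induction b using List.reverseRecOn with
  | nil =>
    intro a d ha
    rcases List.eq_nil_or_concat a with rfl | ⟨a', y, rfl⟩
    · rw [sePropLeft]
      simp [ones]
    · simp only [List.concat_eq_append] at ha ⊢
      have hy : y = -1 := by
        rcases ha with ha | ha
        · exact absurd ha (by simp)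
        · simpa [List.getLast?_concat] using ha
      subst hy
      rw [sePropLeft, dif_neg]
      · simp [ones]
      · rintro ⟨-, h2⟩
        apply h2
        have he : ((a' ++ [(-1 : Int)]).length : Int) + (([] : List Int).length : Int) - 1
            = ((a'.length : ℕ) : Int) := by simp
        rw [he, show (a' ++ [(-1 : Int)]) ++ [] ++ d = a' ++ (-1 : Int) :: d from by simp, pyidx_mid]
  | append_singleton b' y ih =>
    intro a d ha
    have hy : y ≠ -1 := by simp at hb; tauto
    have hb' : (-1 : Int) ∉ b' := by simp at hb ⊢; tauto
    rw [sePropLeft]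
    have hl : ((a.length : Int) + (b' ++ [y]).length - 1) = ((a ++ b').length : Int) := by
      simp <;> push_cast <;> ring
    have hassoc : a ++ (b' ++ [y]) ++ d = (a ++ b') ++ y :: d := by simp
    rw [hl, hassoc, pyidx_mid, pyset_mid]
    have hpos : (0 : Int) ≤ ((a ++ b').length : Int) := by positivity
    rw [dif_pos ⟨hpos, hy⟩]
    have harr : (a ++ b') ++ (1 : Int) :: d = a ++ b' ++ ([1] ++ d) := by simp
    have hidx : ((a ++ b').length : Int) - 1 = (a.length : Int) + (b'.length : Int) - 1 := by
      simp <;> push_cast <;> ring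
    rw [harr, hidx, ih hb' a ([1] ++ d) ha]
    simp [ones_append, ones]

-- right while: sweeps s (no -1, ended by r's leading -1 or the list end) to 1's
theorem sePropRight_spec (s : List Int) (hs : (-1 : Int) ∉ s) :
    ∀ pre r, (r = [] ∨ r.head? = some (-1)) →
    sePropRight (pre ++ s ++ r) (pre.length : Int) ((pre.length : Int) + s.length + r.length - 1)
      = (pre ++ ones s ++ r, (pre.length : Int) + s.length) := by
  induction s with
  | nil =>
    intro pre r hr
    rcases hr with rfl | hr
    · rw [sePropRight, dif_neg]
      · simp [ones]
      · rintro ⟨h1, -⟩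
        simp at h1
    · obtain ⟨h, r', rfl⟩ : ∃ h r', r = h :: r' := by
        cases r with
        | nil => simp at hr
        | cons h r' => exact ⟨h, r', rfl⟩
      have hh : h = -1 := by simpa using hr
      subst hh
      rw [sePropRight, dif_neg]
      · simp [ones]
      · rintro ⟨-, h2⟩
        apply h2
        simpa using pyidx_mid pre (-1) r'
  | cons y s' ih =>
    intro pre r hr
    have hy : y ≠ -1 := by simp at hs; tauto
    have hs' : (-1 : Int) ∉ s' := by simp at hs; tauto
    rw [sePropRight]
    have hle : (pre.length : Int) ≤ (pre.length : Int) + (y :: s').length + r.length - 1 := by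
      simp <;> omega
    have hassoc : pre ++ y :: s' ++ r = pre ++ y :: (s' ++ r) := by simp
    rw [hassoc, pyidx_mid, pyset_mid]
    rw [dif_pos ⟨hle, hy⟩]
    have harr : pre ++ (1 : Int) :: (s' ++ r) = (pre ++ [1]) ++ s' ++ r := by simp
    have hi1 : (pre.length : Int) + 1 = (((pre ++ [(1 : Int)]).length : Int)) := by simp
    have hfin : (pre.length : Int) + (y :: s').length + r.length - 1
        = ((pre ++ [(1 : Int)]).length : Int) + s'.length + r.length - 1 := by
      simp <;> push_cast <;> ring
    rw [harr, hi1, hfin, ih hs' (pre ++ [1]) r hr]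
    simp only [Prod.mk.injEq]
    constructor
    · simp [ones_append, ones]
    · simp <;> push_cast <;> ring

theorem takeWhile_no_neg1 (t : List Int) : (-1 : Int) ∉ t.takeWhile (fun x => !(x == -1)) := by
  intro h
  have := List.mem_takeWhile_imp h
  simp at this

theorem dropWhile_head (t : List Int) :
    t.dropWhile (fun x => !(x == -1)) = [] ∨
    (t.dropWhile (fun x => !(x == -1))).head? = some (-1) := by
  cases hd : t.dropWhile (fun x => !(x == -1)) with
  | nil => exact Or.inl rfl
  | cons y r =>
    right
    have := List.head?_dropWhile_not (fun x => !(x == -1)) t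
    rw [hd] at this
    simp at this ⊢
    omega

theorem sePropaga_def (l : List Int) (i : Int) :
    sePropaga l i = sePropRight (sePropLeft l (i - 1)) (i + 1)
      (((sePropLeft l (i - 1)).length : Int) - 1) := rfl

theorem bafter_ones (s : List Int) (hs : (-1 : Int) ∉ s) : bafter s = ones s := by
  induction s with
  | nil => simp [bafter, ones]
  | cons y s' ih =>
    have hy : y ≠ -1 := by simp at hs; tauto
    have : (-1 : Int) ∉ s' := by simp at hs; tauto
    simp [bafter, hy, ih this, ones]

theorem bafter_append_neg1 (s : List Int) (hs : (-1 : Int) ∉ s) (t' : List Int) :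
    bafter (s ++ (-1 : Int) :: t') = ones s ++ (-1 : Int) :: bmodel [] t' := by
  induction s with
  | nil => simp [bafter, ones]
  | cons y s' ih =>
    have hy : y ≠ -1 := by simp at hs; tauto
    have : (-1 : Int) ∉ s' := by simp at hs; tauto
    simp only [List.cons_append, bafter, ih this]
    simp [hy, ones]

-- the main A-side invariant: the loop at a segment boundary computes bmodel
theorem propLoop_spec : ∀ n (c : List Int), c.length ≤ n → ∀ a b : List Int,
    (-1 : Int) ∉ b → (1 : Int) ∉ b → (a = [] ∨ a.getLast? = some (-1)) →
    propLoop (a ++ b ++ c) ((a.length : Int) + b.length) (((a ++ b ++ c).length : Int) - 1)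
      = a ++ bmodel b c := by
  intro n
  induction n with
  | zero =>
    intro c hc a b hb1 hb2 ha
    have : c = [] := by cases c <;> simp_all
    subst this
    rw [propLoop]
    have : ¬ ((a.length : Int) + b.length ≤ (((a ++ b ++ []).length : Int) - 1)) := by
      simp <;> omega
    rw [dif_neg this]
    simp [bmodel]
  | succ n ih =>
    intro c hc a b hb1 hb2 ha
    cases c with
    | nil =>
      rw [propLoop]
      have : ¬ ((a.length : Int) + b.length ≤ (((a ++ b ++ []).length : Int) - 1)) := by
        simp <;> omega
      rw [dif_neg this]
      simp [bmodel]
    | cons x t =>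
      have hle : (a.length : Int) + b.length ≤ ((a ++ b ++ x :: t).length : Int) - 1 := by
        simp <;> omega
      have hxidx : pyidx (a ++ b ++ x :: t) ((a.length : Int) + b.length) = x := by
        have h1 : a ++ b ++ x :: t = (a ++ b) ++ x :: t := by simp
        have h2 : (a.length : Int) + b.length = (((a ++ b).length : Int)) := by simp
        rw [h1, h2, pyidx_mid]
      rw [propLoop, dif_pos hle, hxidx]
      by_cases hx1 : x = 1
      · subst hx1
        rw [if_pos rfl]
        obtain ⟨s, r, rfl, hsne, hrh⟩ :
            ∃ s r, t = s ++ r ∧ (-1 : Int) ∉ s ∧ (r = [] ∨ r.head? = some (-1)) :=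
          ⟨_, _, (List.takeWhile_append_dropWhile (p := fun x => !(x == -1)) (l := t)).symm,
            takeWhile_no_neg1 t, dropWhile_head t⟩
        have hleft : sePropLeft (a ++ b ++ (1 : Int) :: (s ++ r)) ((a.length : Int) + b.length - 1)
            = a ++ ones b ++ (1 : Int) :: (s ++ r) :=
          sePropLeft_spec b hb1 a ((1 : Int) :: (s ++ r)) ha
        have hsp : sePropaga (a ++ b ++ (1 : Int) :: (s ++ r)) ((a.length : Int) + b.length)
            = (a ++ ones b ++ (1 : Int) :: ones s ++ r, (a.length : Int) + b.length + 1 + s.length) := by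
          rw [sePropaga_def, hleft]
          have hpre : a ++ ones b ++ (1 : Int) :: (s ++ r) = (a ++ ones b ++ [1]) ++ s ++ r := by simp
          have hlen1 : ((a ++ ones b ++ [(1 : Int)]).length : Int) = (a.length : Int) + b.length + 1 := by
            simp [ones_length] <;> push_cast <;> ring
          have hlen2 : (((a ++ ones b ++ [(1 : Int)]) ++ s ++ r).length : Int) - 1
              = ((a ++ ones b ++ [(1 : Int)]).length : Int) + s.length + r.length - 1 := by
            simp <;> push_cast <;> ring
          rw [hpre, hlen2, ← hlen1, sePropRight_spec s hsne (a ++ ones b ++ [1]) r hrh, hlen1]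
          simp only [Prod.mk.injEq]
          constructor <;> simp
        rw [hsp]
        show propLoop (a ++ ones b ++ (1 : Int) :: ones s ++ r)
            ((a.length : Int) + b.length + 1 + s.length + 1)
            (((a ++ b ++ (1 : Int) :: (s ++ r)).length : Int) - 1) = a ++ bmodel b (1 :: (s ++ r))
        rcases hrh with rfl | hrh
        · -- r = []: loop index passes the end, loop stops
          rw [propLoop]
          have hlen : ¬ ((a.length : Int) + b.length + 1 + s.length + 1
              ≤ ((a ++ b ++ (1 : Int) :: (s ++ ([] : List Int))).length : Int) - 1) := by
            simp <;> omega
          rw [dif_neg hlen]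
          simp only [List.append_nil]
          rw [show bmodel b (1 :: s) = ones b ++ 1 :: bafter s from by simp [bmodel],
            bafter_ones s hsne]
          simp
        · -- r = -1 :: t'
          obtain ⟨h0, t', rfl⟩ : ∃ h0 t', r = h0 :: t' := by
            cases r with
            | nil => simp at hrh
            | cons h0 t' => exact ⟨h0, t', rfl⟩
          have hh0 : h0 = -1 := by simpa using hrh
          subst hh0
          have harr : a ++ ones b ++ (1 : Int) :: ones s ++ (-1 : Int) :: t'
              = (a ++ ones b ++ (1 : Int) :: ones s ++ [(-1 : Int)]) ++ [] ++ t' := by simp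
          have hlen' : (a.length : Int) + b.length + 1 + s.length + 1
              = ((a ++ ones b ++ (1 : Int) :: ones s ++ [(-1 : Int)]).length : Int) + (([] : List Int).length : Int) := by
            simp [ones_length] <;> push_cast <;> ring
          have hlenfull : ((a ++ b ++ (1 : Int) :: (s ++ (-1 : Int) :: t')).length : Int) - 1
              = (((a ++ ones b ++ (1 : Int) :: ones s ++ [(-1 : Int)]) ++ [] ++ t').length : Int) - 1 := by
            simp [ones_length] <;> push_cast <;> ring
          have ht' : t'.length ≤ n := by
            simp at hc; omega
          have hlast : (a ++ ones b ++ (1 : Int) :: ones s ++ [(-1 : Int)]) = [] ∨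
              (a ++ ones b ++ (1 : Int) :: ones s ++ [(-1 : Int)]).getLast? = some (-1) := by
            right
            rw [show a ++ ones b ++ (1 : Int) :: ones s ++ [(-1 : Int)]
                = (a ++ ones b ++ (1 : Int) :: ones s) ++ [(-1 : Int)] from by simp,
              List.getLast?_concat]
          rw [harr, hlen', hlenfull,
            ih t' ht' (a ++ ones b ++ (1 : Int) :: ones s ++ [(-1 : Int)]) [] (by simp) (by simp) hlast]
          rw [show bmodel b (1 :: (s ++ (-1 : Int) :: t')) = ones b ++ 1 :: bafter (s ++ (-1 : Int) :: t') from by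
            simp [bmodel]]
          rw [bafter_append_neg1 s hsne t']
          simp
      · rw [if_neg hx1]
        by_cases hxm : x = -1
        · subst hxm
          have harr : a ++ b ++ (-1 : Int) :: t = (a ++ b ++ [(-1 : Int)]) ++ [] ++ t := by simp
          have hi : (a.length : Int) + b.length + 1
              = ((a ++ b ++ [(-1 : Int)]).length : Int) + ([] : List Int).length := by
            simp <;> push_cast <;> ring
          have ht : t.length ≤ n := by simp at hc; omega
          rw [harr, hi,
            ih t ht (a ++ b ++ [(-1 : Int)]) [] (by simp) (by simp) (Or.inr (by simp))]
          simp [bmodel, hx1]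
        · have harr : a ++ b ++ x :: t = a ++ (b ++ [x]) ++ t := by simp
          have hi : (a.length : Int) + b.length + 1 = (a.length : Int) + ((b ++ [x]).length : Int) := by
            simp <;> push_cast <;> ring
          have ht : t.length ≤ n := by simp at hc; omega
          rw [harr, hi,
            ih t ht a (b ++ [x]) (by simp [hxm]; tauto) (by simp [hx1]; tauto) ha]
          simp [bmodel, hx1, hxm]

-- B side: goB accumulates res ++ smodel, and smodel = bmodel on clean segments
def smodel (seg : List Int) : List Int → List Int
  | [] => flushSeg seg
  | x :: t => if x = -1 then flushSeg seg ++ -1 :: smodel [] t else smodel (seg ++ [x]) t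

theorem goB_eq (xs : List Int) : ∀ res seg, goB xs res seg = res ++ smodel seg xs := by
  induction xs with
  | nil => intro res seg; simp [goB, smodel]
  | cons x t ih =>
    intro res seg
    by_cases hx : x = -1
    · subst hx; simp [goB, smodel, ih]
    · simp [goB, smodel, hx, ih]

theorem smodel_eq_bmodel : ∀ n (t : List Int), t.length ≤ n →
    (∀ b : List Int, (-1 : Int) ∉ b → (1 : Int) ∉ b → bmodel b t = smodel b t) ∧
    (∀ seg : List Int, (1 : Int) ∈ seg → smodel seg t = ones seg ++ bafter t) := by
  intro n
  induction n with
  | zero =>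
    intro t ht
    have : t = [] := by cases t <;> simp_all
    subst this
    constructor
    · intro b hb1 hb2
      simp [bmodel, smodel, flushSeg]
      intro h
      exact absurd h hb2
    · intro seg hseg
      simp [smodel, flushSeg, bafter, hseg, ones]
  | succ n ih =>
    intro t ht
    constructor
    · intro b hb1 hb2
      cases t with
      | nil =>
        simp [bmodel, smodel, flushSeg]
        intro h; exact absurd h hb2
      | cons x t' =>
        have ht' : t'.length ≤ n := by simp at ht; omega
        by_cases hx1 : x = 1
        · subst hx1
          rw [show bmodel b (1 :: t') = ones b ++ 1 :: bafter t' from by simp [bmodel]]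
          rw [show smodel b ((1 : Int) :: t') = smodel (b ++ [1]) t' from by simp [smodel]]
          rw [(ih t' ht').2 (b ++ [1]) (by simp)]
          simp [ones_append, ones]
        · by_cases hxm : x = -1
          · subst hxm
            rw [show bmodel b (-1 :: t') = b ++ -1 :: bmodel [] t' from by simp [bmodel]]
            rw [show smodel b ((-1 : Int) :: t') = flushSeg b ++ -1 :: smodel [] t' from by simp [smodel]]
            rw [(ih t' ht').1 [] (by simp) (by simp)]
            have : flushSeg b = b := by
              simp [flushSeg]; intro h; exact absurd h hb2
            rw [this]
          · rw [show bmodel b (x :: t') = bmodel (b ++ [x]) t' from by simp [bmodel, hx1, hxm]]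
            rw [show smodel b (x :: t') = smodel (b ++ [x]) t' from by simp [smodel, hxm]]
            exact (ih t' ht').1 (b ++ [x]) (by simp [hxm]; tauto) (by simp [hx1]; tauto)
    · intro seg hseg
      cases t with
      | nil => simp [smodel, flushSeg, bafter, hseg, ones]
      | cons y t' =>
        have ht' : t'.length ≤ n := by simp at ht; omega
        by_cases hy : y = -1
        · subst hy
          rw [show smodel seg ((-1 : Int) :: t') = flushSeg seg ++ -1 :: smodel [] t' from by simp [smodel]]
          rw [show bafter ((-1 : Int) :: t') = -1 :: bmodel [] t' from by simp [bafter]]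
          rw [(ih t' ht').1 [] (by simp) (by simp)]
          simp [flushSeg, hseg, ones]
        · rw [show smodel seg (y :: t') = smodel (seg ++ [y]) t' from by simp [smodel, hy]]
          rw [(ih t' ht').2 (seg ++ [y]) (by simp; exact Or.inl hseg)]
          rw [show bafter (y :: t') = 1 :: bafter t' from by simp [bafter, hy]]
          simp [ones_append, ones]

-- ===== VERDICT (by name: the statement is the Claim_ definition above) =====
theorem propagar_spec : Claim_equal_propagar := by
  intro L _
  unfold Spec_propagar propagar propagar_alt
  have hA := propLoop_spec L.length L (le_refl _) [] [] (by simp) (by simp) (Or.inl rfl)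
  simp only [List.nil_append, List.length_nil, Nat.cast_zero, Int.zero_add] at hA
  rw [goB_eq L [] [], List.nil_append, hA,
    (smodel_eq_bmodel L.length L (le_refl _)).1 [] (by simp) (by simp)]
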